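-- pv_equiv track=rewrite | github.com/9907daniel/good_solutions | Greedy/230809_152995_인사고과/152995.py | solution
-- ===== SOURCE A (Python) =====
-- def solution(scores):
--     wonhoe = scores[0]
--     scores.sort(key=lambda x:(-x[0],x[1]))
--     before = 0
--     total = sum(wonhoe)
--
--     count = 1
--     for score in scores:
--         if wonhoe[0] < score[0] and wonhoe[1] < score[1]:
--             return -1
--         if before <= score[1]:
--
--             if total < score[0]+ score[1]:
--                 count += 1
--             before = score[1]
--
--     return count
-- ===== SOURCE B (Python) =====
-- def solution(scores):
--     wonhoe = scores[0]
--     total = sum(wonhoe)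
--     if any(wonhoe[0] < q[0] and wonhoe[1] < q[1] for q in scores):
--         return -1
--     return 1 + sum(1 for p in scores
--                    if total < p[0] + p[1]
--                    and not any(p[0] < o[0] and p[1] < o[1] for o in scores))
-- ===== Notes on version B (the rewrite author's own statement) =====
-- stated objective: simpler
-- what changed: B replaces A's sort-then-single-pass with a running-max frontier by a direct declarative test: return -1 if anyone strictly dominates wonhoe, else count 1 plus the candidates whose two-score sum beats wonhoe's and whom nobody strictly dominates (no sort, no mutation of the argument; equivalence is about the return value only, A sorts scores in place).
-- intended difference: On inputs where wonhoe is undominated but some undominated candidate with a NEGATIVE second score has sum of its first two scores exceeding wonhoe's total, A's running max is initialised to 0 so A silently skips that candidate and returns a smaller count, while B counts every undominated higher-sum candidate, which is the intended ranking. — e.g. on solution([[0, -1], [5, -2]]): A returns 1, B returns 2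
import Mathlib
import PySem

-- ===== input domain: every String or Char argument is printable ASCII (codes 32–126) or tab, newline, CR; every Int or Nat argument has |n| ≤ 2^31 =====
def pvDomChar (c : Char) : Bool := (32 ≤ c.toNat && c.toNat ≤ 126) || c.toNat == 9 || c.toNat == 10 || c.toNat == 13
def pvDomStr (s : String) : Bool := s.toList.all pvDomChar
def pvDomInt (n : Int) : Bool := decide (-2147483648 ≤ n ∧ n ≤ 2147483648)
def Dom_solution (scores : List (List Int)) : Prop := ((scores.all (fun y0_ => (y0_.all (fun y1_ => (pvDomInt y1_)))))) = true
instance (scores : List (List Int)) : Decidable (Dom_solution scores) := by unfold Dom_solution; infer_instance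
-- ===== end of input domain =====

-- B drops A's sort/running-max pass for a direct nested domination count (simpler, no mutation);
-- A sorts `scores` in place and B does not: the equivalence proved here is about the RETURN value only.

-- shared projections: score[0] and score[1] (Pre_ guarantees length ≥ 2, so the default is never used)
def sc0 (x : List Int) : Int := PySem.List.pyGetD x 0 0
def sc1 (x : List Int) : Int := PySem.List.pyGetD x 1 0

-- ===== PORT A =====
-- the for-loop of A, with its early `return -1` and the running `before` / `count` state
def loopA (w0 w1 total : Int) : List (List Int) → Int → Int → Int
  | [], _, count => count
  | s :: rest, before, count =>
    if w0 < sc0 s ∧ w1 < sc1 s then -1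
    else if before ≤ sc1 s then
      loopA w0 w1 total rest (sc1 s) (if total < sc0 s + sc1 s then count + 1 else count)
    else loopA w0 w1 total rest before count

def solution (scores : List (List Int)) : Int :=
  let wonhoe := PySem.List.pyGetD scores 0 []
  let ss := PySem.List.sorted2 scores (fun x => -(sc0 x)) (fun x => sc1 x)
  loopA (sc0 wonhoe) (sc1 wonhoe) wonhoe.sum ss 0 1

-- ===== PORT B =====
def solution_alt (scores : List (List Int)) : Int :=
  let wonhoe := PySem.List.pyGetD scores 0 []
  let total := wonhoe.sum
  if scores.any (fun q => decide (sc0 wonhoe < sc0 q) && decide (sc1 wonhoe < sc1 q)) then -1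
  else 1 + (scores.countP (fun p =>
      decide (total < sc0 p + sc1 p) &&
      !(scores.any (fun o => decide (sc0 p < sc0 o) && decide (sc1 p < sc1 o)))) : Int)

-- ===== PRECONDITION & SPEC =====
-- Pre_ excludes exactly the inputs on which A raises IndexError: empty `scores`, or an inner list
-- with fewer than two entries (A reads scores[0], score[0] and score[1] of every score).
def Pre_solution (scores : List (List Int)) : Prop :=
  scores ≠ [] ∧ ∀ s ∈ scores, 2 ≤ s.length
instance (scores : List (List Int)) : Decidable (Pre_solution scores) := by
  unfold Pre_solution; infer_instance
def pvWitness_solution : List (List Int) := [[3, 4], [5, 1]]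

-- On inputs where nobody dominates wonhoe but some undominated candidate with a NEGATIVE second
-- score has first-two-scores sum exceeding wonhoe's total, A's running max starts at 0 and skips
-- that candidate (smaller count), while B counts every undominated higher-sum candidate, as intended.
-- "nobody in l strictly dominates p in both scores"
def nodom (l : List (List Int)) (p : List Int) : Bool :=
  l.all fun o => decide (sc0 o ≤ sc0 p ∨ sc1 o ≤ sc1 p)
-- (stated as a short-circuiting boolean so it is cheap to decide: the guard fails fast)
def D_solution (scores : List (List Int)) : Prop :=
  (let w := scores.headD []
   if nodom scores w then
     scores.any fun p => decide (sc1 p < 0 ∧ w.sum - sc0 p < sc1 p) && nodom scores p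
   else false) = true
instance (scores : List (List Int)) : Decidable (D_solution scores) := by
  unfold D_solution; infer_instance

def Spec_solution (scores : List (List Int)) (out : Int) : Prop :=
  ¬ D_solution scores → out = solution_alt scores
instance (scores : List (List Int)) (out : Int) : Decidable (Spec_solution scores out) := by
  unfold Spec_solution; infer_instance

def pvDiffWitness_solution : List (List Int) := [[0, -1], [5, -2]]
def pvDiffWitnessOut_solution : Int × Int := (1, 2)

-- ===== CLAIM (what is proved, stated in full; the proofs are below) =====
def Claim_unchanged_solution : Prop :=
  ∀ (scores : List (List Int)), Dom_solution scores → Pre_solution scores →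
    Spec_solution scores (solution scores)
def Claim_changed_solution : Prop :=
  Dom_solution (pvDiffWitness_solution) ∧ Pre_solution (pvDiffWitness_solution) ∧
  D_solution (pvDiffWitness_solution) ∧
  solution (pvDiffWitness_solution) = pvDiffWitnessOut_solution.1 ∧
  solution_alt (pvDiffWitness_solution) = pvDiffWitnessOut_solution.2 ∧
  pvDiffWitnessOut_solution.1 ≠ pvDiffWitnessOut_solution.2
def Claim_exact_solution : Prop :=
  ∀ (scores : List (List Int)), Dom_solution scores → Pre_solution scores →
    D_solution scores → solution scores ≠ solution_alt scores


-- ===== LEMMAS AND PROOFS =====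

-- the sort order of A: descending first score, ascending second score (stable lexicographic key)
def Rord (a b : List Int) : Prop := sc0 b < sc0 a ∨ (sc0 a = sc0 b ∧ sc1 a ≤ sc1 b)

-- the comparison boolean sorted2 uses for A's key (-x[0], x[1])
def bf (a b : List Int) : Bool :=
  decide ((-(sc0 a)) < (-(sc0 b))) || (!decide ((-(sc0 b)) < (-(sc0 a))) && decide (sc1 a < sc1 b))

-- the pure counting pass of A's loop, once the early -1 return is known not to fire
def cntA (t : Int) : List (List Int) → Int → Int
  | [], _ => 0
  | s :: rest, before =>
    if before ≤ sc1 s then (if t < sc0 s + sc1 s then 1 else 0) + cntA t rest (sc1 s)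
    else cntA t rest before

-- B's per-candidate predicate, and A's with the running-max threshold b
def pB (t : Int) (l : List (List Int)) (p : List Int) : Bool :=
  decide (t < sc0 p + sc1 p) &&
    !(l.any (fun o => decide (sc0 p < sc0 o) && decide (sc1 p < sc1 o)))

def pA (t : Int) (l : List (List Int)) (b : Int) (p : List Int) : Bool :=
  decide (b ≤ sc1 p) && pB t l p

theorem nodom_iff (l : List (List Int)) (p : List Int) :
    nodom l p = true ↔ ∀ o ∈ l, ¬(sc0 p < sc0 o ∧ sc1 p < sc1 o) := by
  simp only [nodom, List.all_eq_true, decide_eq_true_eq, not_and, not_lt]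
  constructor <;> (intro h o ho; have := h o ho; omega)

theorem headD_eq_pyGetD (scores : List (List Int)) :
    scores.headD [] = PySem.List.pyGetD scores 0 [] := by
  cases scores <;> simp [PySem.List.pyGetD, PySem.List.pyGet?, PySem.List.pyIdx?]

theorem D_solution_iff (scores : List (List Int)) :
    D_solution scores ↔
      ((∀ q ∈ scores, ¬(sc0 (PySem.List.pyGetD scores 0 []) < sc0 q ∧
                        sc1 (PySem.List.pyGetD scores 0 []) < sc1 q)) ∧
       ∃ p ∈ scores, sc1 p < 0 ∧ (PySem.List.pyGetD scores 0 []).sum < sc0 p + sc1 p ∧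
         ∀ o ∈ scores, ¬(sc0 p < sc0 o ∧ sc1 p < sc1 o)) := by
  unfold D_solution
  rw [← headD_eq_pyGetD]
  by_cases h : nodom scores (scores.headD []) = true
  · rw [if_pos h]
    have h' := (nodom_iff _ _).mp h
    simp only [List.any_eq_true, Bool.and_eq_true, decide_eq_true_eq, nodom_iff]
    constructor
    · rintro ⟨x, hx, ⟨h1, h2⟩, h3⟩
      exact ⟨h', x, hx, h1, by omega, h3⟩
    · rintro ⟨_, x, hx, h1, h2, h3⟩
      exact ⟨x, hx, ⟨h1, by omega⟩, h3⟩
  · rw [if_neg h]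
    have h' := fun hp => h ((nodom_iff _ _).mpr hp)
    simp only [Bool.false_eq_true, false_iff]
    rintro ⟨hq, _⟩
    exact h' hq

theorem pB_iff (t : Int) (l : List (List Int)) (p : List Int) :
    pB t l p = true ↔ (t < sc0 p + sc1 p ∧ ∀ o ∈ l, ¬(sc0 p < sc0 o ∧ sc1 p < sc1 o)) := by
  simp [pB, List.any_eq_false, -not_and]

theorem pA_iff (t : Int) (l : List (List Int)) (b : Int) (p : List Int) :
    pA t l b p = true ↔
      (b ≤ sc1 p ∧ t < sc0 p + sc1 p ∧ ∀ o ∈ l, ¬(sc0 p < sc0 o ∧ sc1 p < sc1 o)) := by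
  simp [pA, pB_iff]

theorem bf_true {a b : List Int} (h : bf a b = true) : Rord a b := by
  simp only [bf, Bool.or_eq_true, Bool.and_eq_true, Bool.not_eq_true', decide_eq_true_eq,
    decide_eq_false_iff_not] at h
  unfold Rord; omega

theorem bf_false {a b : List Int} (h : bf a b = false) : Rord b a := by
  simp only [bf, Bool.or_eq_false_iff, Bool.and_eq_false_iff, Bool.not_eq_false',
    decide_eq_true_eq, decide_eq_false_iff_not] at h
  unfold Rord; omega

theorem Rord_trans {a b c : List Int} (h1 : Rord a b) (h2 : Rord b c) : Rord a c := by
  unfold Rord at *; omega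

theorem insertBy_pairwise (x : List Int) (l : List (List Int)) (hl : l.Pairwise Rord) :
    (PySem.List.insertBy bf x l).Pairwise Rord := by
  induction l with
  | nil => simp [PySem.List.insertBy]
  | cons y ys ih =>
    rcases List.pairwise_cons.mp hl with ⟨hy, hys⟩
    rw [PySem.List.insertBy]
    by_cases h : bf x y = true
    · rw [if_pos h]
      refine List.pairwise_cons.mpr ⟨?_, hl⟩
      intro z hz
      rcases List.mem_cons.mp hz with rfl | hz'
      · exact bf_true h
      · exact Rord_trans (bf_true h) (hy z hz')
    · rw [if_neg h]
      refine List.pairwise_cons.mpr ⟨?_, ih hys⟩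
      intro z hz
      rcases (PySem.List.mem_insertBy bf x z ys).mp hz with rfl | hz'
      · exact bf_false (Bool.not_eq_true _ ▸ eq_false_of_ne_true h)
      · exact hy z hz'

theorem foldl_insertBy_pairwise :
    ∀ (xs acc : List (List Int)), acc.Pairwise Rord →
      (xs.foldl (fun acc x => PySem.List.insertBy bf x acc) acc).Pairwise Rord := by
  intro xs
  induction xs with
  | nil => intro acc h; exact h
  | cons x xs ih => intro acc h; exact ih _ (insertBy_pairwise x acc h)

theorem sorted2_pairwise_R (xs : List (List Int)) :
    (PySem.List.sorted2 xs (fun x => -(sc0 x)) (fun x => sc1 x)).Pairwise Rord := by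
  have h : PySem.List.sorted2 xs (fun x => -(sc0 x)) (fun x => sc1 x) =
      xs.foldl (fun acc x => PySem.List.insertBy bf x acc) [] := rfl
  rw [h]
  exact foldl_insertBy_pairwise xs [] (List.Pairwise.nil)

-- A's loop returns -1 as soon as some element dominates wonhoe
theorem loopA_neg (w0 w1 t : Int) :
    ∀ (l : List (List Int)), (∃ s ∈ l, w0 < sc0 s ∧ w1 < sc1 s) →
      ∀ b c, loopA w0 w1 t l b c = -1 := by
  intro l
  induction l with
  | nil => intro h; simp at h
  | cons s rest ih =>
    intro h b c
    rw [loopA]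
    by_cases hs : w0 < sc0 s ∧ w1 < sc1 s
    · rw [if_pos hs]
    · rw [if_neg hs]
      have h' : ∃ x ∈ rest, w0 < sc0 x ∧ w1 < sc1 x := by
        rcases h with ⟨x, hx, hd⟩
        rcases List.mem_cons.mp hx with rfl | hx'
        · exact absurd hd hs
        · exact ⟨x, hx', hd⟩
      split <;> exact ih h' _ _

-- with no dominator the loop is the pure counting pass
theorem loopA_pos (w0 w1 t : Int) :
    ∀ (l : List (List Int)), (∀ s ∈ l, ¬(w0 < sc0 s ∧ w1 < sc1 s)) →
      ∀ b c, loopA w0 w1 t l b c = c + cntA t l b := by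
  intro l
  induction l with
  | nil => intro _ b c; rw [loopA, cntA]; ring
  | cons s rest ih =>
    intro h b c
    have hs := h s (List.mem_cons_self)
    have hrest : ∀ x ∈ rest, ¬(w0 < sc0 x ∧ w1 < sc1 x) :=
      fun x hx => h x (List.mem_cons_of_mem _ hx)
    rw [loopA, cntA, if_neg hs]
    by_cases hb : b ≤ sc1 s
    · rw [if_pos hb, if_pos hb, ih hrest]
      split <;> ring
    · rw [if_neg hb, if_neg hb, ih hrest]

-- the heart: over a list sorted by (-x[0], x[1]), the running-max pass counts exactly the
-- candidates with threshold ≤ second score, winning sum, and no strict dominator in the list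
theorem cntA_eq (t : Int) :
    ∀ (l : List (List Int)), l.Pairwise Rord →
      ∀ b, cntA t l b = (l.countP (pA t l b) : Int) := by
  intro l
  induction l with
  | nil => intro _ b; rw [cntA]; simp
  | cons s rest ih =>
    intro hp b
    rcases List.pairwise_cons.mp hp with ⟨hps, hrest⟩
    have hnds : ∀ o ∈ s :: rest, ¬(sc0 s < sc0 o ∧ sc1 s < sc1 o) := by
      intro o ho
      rcases List.mem_cons.mp ho with rfl | ho'
      · omega
      · have := hps o ho'; unfold Rord at this; omega
    rw [cntA, List.countP_cons]
    by_cases hb : b ≤ sc1 s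
    · rw [if_pos hb, ih hrest (sc1 s)]
      have hhead : pA t (s :: rest) b s = decide (t < sc0 s + sc1 s) := by
        by_cases ht : t < sc0 s + sc1 s
        · simp only [decide_eq_true ht]
          exact (pA_iff _ _ _ _).mpr ⟨hb, ht, hnds⟩
        · simp only [decide_eq_false ht, ← Bool.not_eq_true, pA_iff]
          tauto
      have hcongr : rest.countP (pA t rest (sc1 s)) = rest.countP (pA t (s :: rest) b) := by
        apply List.countP_congr
        intro x hx
        have hsx := hps x hx
        unfold Rord at hsx
        rw [pA_iff, pA_iff]
        constructor
        · rintro ⟨h1, h2, h3⟩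
          refine ⟨by omega, h2, ?_⟩
          intro o ho
          rcases List.mem_cons.mp ho with rfl | ho'
          · omega
          · exact h3 o ho'
        · rintro ⟨h1, h2, h3⟩
          have hxs := h3 s (List.mem_cons_self)
          refine ⟨by omega, h2, fun o ho => h3 o (List.mem_cons_of_mem _ ho)⟩
      rw [hcongr, hhead]
      by_cases ht : t < sc0 s + sc1 s
      · simp [ht]; ring
      · simp [ht]
    · rw [if_neg hb, ih hrest b]
      have hhead : pA t (s :: rest) b s = false := by
        rw [← Bool.not_eq_true, pA_iff]; tauto
      have hcongr : rest.countP (pA t rest b) = rest.countP (pA t (s :: rest) b) := by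
        apply List.countP_congr
        intro x hx
        have hsx := hps x hx
        unfold Rord at hsx
        rw [pA_iff, pA_iff]
        constructor
        · rintro ⟨h1, h2, h3⟩
          refine ⟨h1, h2, ?_⟩
          intro o ho
          rcases List.mem_cons.mp ho with rfl | ho'
          · omega
          · exact h3 o ho'
        · rintro ⟨h1, h2, h3⟩
          exact ⟨h1, h2, fun o ho => h3 o (List.mem_cons_of_mem _ ho)⟩
      rw [hcongr, hhead]
      simp

-- strict monotonicity of countP given a pointwise implication and one separating witness
theorem countP_lt {α : Type} (p q : α → Bool) :
    ∀ (l : List α), (∀ x ∈ l, p x = true → q x = true) →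
      (∃ x ∈ l, q x = true ∧ p x = false) → l.countP p < l.countP q := by
  intro l
  induction l with
  | nil => intro _ h; simp at h
  | cons a l ih =>
    rintro hm ⟨x, hx, hq, hp⟩
    rw [List.countP_cons, List.countP_cons]
    have hmono : l.countP p ≤ l.countP q :=
      List.countP_mono_left (fun y hy h => hm y (List.mem_cons_of_mem _ hy) h)
    rcases List.mem_cons.mp hx with rfl | hx'
    · rw [hq, hp]; simp; omega
    · have hlt := ih (fun y hy h => hm y (List.mem_cons_of_mem _ hy) h) ⟨x, hx', hq, hp⟩
      have := hm a (List.mem_cons_self)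
      split_ifs with h1 h2 <;> try omega
      exact absurd (this h1) (by simp [h2])

-- unified characterisation of A on inputs where nobody dominates wonhoe
theorem solution_of_no_dom (scores : List (List Int))
    (hnd : ∀ q ∈ scores, ¬(sc0 (PySem.List.pyGetD scores 0 []) < sc0 q ∧
                           sc1 (PySem.List.pyGetD scores 0 []) < sc1 q)) :
    solution scores =
      1 + (scores.countP (pA (PySem.List.pyGetD scores 0 []).sum scores 0) : Int) := by
  unfold solution
  set w := PySem.List.pyGetD scores 0 [] with hw
  set L := PySem.List.sorted2 scores (fun x => -(sc0 x)) (fun x => sc1 x) with hL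
  have hperm : L.Perm scores := PySem.List.sorted2_perm scores _ _ false
  have hndL : ∀ s ∈ L, ¬(sc0 w < sc0 s ∧ sc1 w < sc1 s) :=
    fun s hs => hnd s (hperm.mem_iff.mp hs)
  rw [loopA_pos (sc0 w) (sc1 w) w.sum L hndL 0 1,
      cntA_eq w.sum L (sorted2_pairwise_R scores) 0]
  have hfun : pA w.sum L 0 = pA w.sum scores 0 := by
    funext x
    unfold pA pB
    rw [hperm.any_eq]
  rw [hfun, hperm.countP_eq]

theorem solution_alt_of_no_dom (scores : List (List Int))
    (hnd : ∀ q ∈ scores, ¬(sc0 (PySem.List.pyGetD scores 0 []) < sc0 q ∧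
                           sc1 (PySem.List.pyGetD scores 0 []) < sc1 q)) :
    solution_alt scores =
      1 + (scores.countP (pB (PySem.List.pyGetD scores 0 []).sum scores) : Int) := by
  unfold solution_alt
  have hany : scores.any (fun q => decide (sc0 (PySem.List.pyGetD scores 0 []) < sc0 q) &&
      decide (sc1 (PySem.List.pyGetD scores 0 []) < sc1 q)) = false := by
    rw [List.any_eq_false]
    intro q hq
    simp only [Bool.and_eq_true, decide_eq_true_eq]
    exact fun h => hnd q hq ⟨h.1, h.2⟩
  simp only [hany, Bool.false_eq_true, if_false]
  rfl

-- ===== VERDICT (by name: the statement is the Claim_ definition above) =====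
theorem solution_spec : Claim_unchanged_solution := by
  intro scores _ _ hD
  rw [D_solution_iff] at hD
  by_cases hdom : ∀ q ∈ scores, ¬(sc0 (PySem.List.pyGetD scores 0 []) < sc0 q ∧
      sc1 (PySem.List.pyGetD scores 0 []) < sc1 q)
  · rw [solution_of_no_dom scores hdom, solution_alt_of_no_dom scores hdom]
    have : scores.countP (pA (PySem.List.pyGetD scores 0 []).sum scores 0) =
        scores.countP (pB (PySem.List.pyGetD scores 0 []).sum scores) := by
      apply List.countP_congr
      intro x hx
      rw [pA_iff, pB_iff]
      constructor
      · rintro ⟨_, h2, h3⟩; exact ⟨h2, h3⟩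
      · rintro ⟨h2, h3⟩
        refine ⟨?_, h2, h3⟩
        by_contra hneg
        exact hD ⟨hdom, ⟨x, hx, by omega, h2, fun o ho hc => h3 o ho hc⟩⟩
    rw [this]
  · push Not at hdom
    rcases hdom with ⟨q, hq, h1, h2⟩
    have hperm : (PySem.List.sorted2 scores (fun x => -(sc0 x)) (fun x => sc1 x)).Perm scores :=
      PySem.List.sorted2_perm scores _ _ false
    have hA : solution scores = -1 := by
      unfold solution
      exact loopA_neg _ _ _ _ ⟨q, hperm.mem_iff.mpr hq, h1, h2⟩ 0 1
    have hB : solution_alt scores = -1 := by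
      unfold solution_alt
      have hany : scores.any (fun p => decide (sc0 (PySem.List.pyGetD scores 0 []) < sc0 p) &&
          decide (sc1 (PySem.List.pyGetD scores 0 []) < sc1 p)) = true := by
        rw [List.any_eq_true]
        exact ⟨q, hq, by simp [h1, h2]⟩
      simp only [hany, if_true]
    rw [hA, hB]

theorem solution_changed : Claim_changed_solution := by
  unfold Claim_changed_solution; decide

theorem solution_tight : Claim_exact_solution := by
  intro scores _ _ hD
  rw [D_solution_iff] at hD
  rcases hD with ⟨hnd, p, hp, hneg, hsum, hundom⟩
  rw [solution_of_no_dom scores hnd, solution_alt_of_no_dom scores hnd]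
  have hlt : scores.countP (pA (PySem.List.pyGetD scores 0 []).sum scores 0) <
      scores.countP (pB (PySem.List.pyGetD scores 0 []).sum scores) := by
    apply countP_lt
    · intro x _ hx
      rw [pA_iff] at hx
      rw [pB_iff]
      exact ⟨hx.2.1, hx.2.2⟩
    · refine ⟨p, hp, (pB_iff _ _ _).mpr ⟨hsum, fun o ho hc => hundom o ho hc⟩, ?_⟩
      rw [← Bool.not_eq_true, pA_iff]
      rintro ⟨h0, _, _⟩
      omega
  intro heq
  omega
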